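-- pv_equiv track=rewrite | github.com/anthopark/Anteater-Pathway | courses/populate_mongo.py | determine_level
-- ===== SOURCE A (Python) =====
-- def determine_level(course_num) -> str:
--     result = ''
--     for ch in course_num:
--         if ch.isdigit():
--             result += ch
--
--     if 1 <= int(result) <= 99:
--         return 'Lower Division'
--     elif 100 <= int(result) <= 199:
--         return 'Upper Division'
--     elif 200 <= int(result) <= 299:
--         return 'Graduate'
--     else:
--         return 'Other'
-- ===== SOURCE B (Python) =====
-- def determine_level(course_num) -> str:
--     # Classify lexicographically: no integer conversion. Strip leading zeros from
--     # the digit string; the length of what remains (and, for length 3, its leading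
--     # digit) determines the division band.
--     digits = ''.join(c for c in course_num if c.isdigit())
--     if not digits:
--         raise ValueError(f"no course number digits in {course_num!r}")
--     sig = digits.lstrip('0')
--     if not sig or len(sig) > 3:
--         return 'Other'
--     if len(sig) < 3:
--         return 'Lower Division'
--     return {'1': 'Upper Division', '2': 'Graduate'}.get(sig[0], 'Other')
-- ===== Notes on version B (the rewrite author's own statement) =====
-- stated objective: alternative
-- what changed: B never converts the digits to an integer: it strips leading zeros from the extracted digit string and classifies lexicographically by the length of the remainder (0 or >3 -> Other, 1-2 -> Lower Division) and, for length 3, by its leading character via a dict lookup, replacing A's int() conversion and chained range comparisons.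
-- outside the precondition, e.g. on determine_level(''): A raises ValueError, B raises ValueError
import Mathlib
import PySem

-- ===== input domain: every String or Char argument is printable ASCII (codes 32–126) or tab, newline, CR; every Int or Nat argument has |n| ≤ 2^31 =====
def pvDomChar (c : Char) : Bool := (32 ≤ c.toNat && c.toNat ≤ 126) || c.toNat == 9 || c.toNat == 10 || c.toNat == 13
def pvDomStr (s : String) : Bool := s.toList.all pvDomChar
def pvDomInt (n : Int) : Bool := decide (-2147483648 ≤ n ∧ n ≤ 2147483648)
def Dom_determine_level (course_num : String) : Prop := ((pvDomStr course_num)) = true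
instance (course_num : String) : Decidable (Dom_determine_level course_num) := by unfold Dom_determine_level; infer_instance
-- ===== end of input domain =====

-- B classifies the course number lexicographically — strip leading zeros from the digit string and
-- bucket by its length and leading character — instead of A's int() conversion and range chain
-- (objective: alternative); same return value wherever A returns.

-- ===== PORT A =====
-- hand port of Python's int(cs) for the all-digit strings A ever passes to it
-- (exact there: no sign/whitespace/underscore can occur in `result`; int('') raises ValueError → none)
def pyIntOfDigits? (cs : List Char) : Option Int :=
  if cs.isEmpty then none
  else some ((cs.foldl (fun a c => a * 10 + (c.toNat - 48)) 0 : Nat) : Int)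

def determine_level (course_num : String) : String :=
  let result : List Char :=
    course_num.toList.foldl (fun acc ch => if PySem.Chars.isdigit ch then acc ++ [ch] else acc) []
  match pyIntOfDigits? result with
  | none => ""   -- int('') raises ValueError; excluded by Pre_determine_level
  | some n =>
    if 1 ≤ n ∧ n ≤ 99 then "Lower Division"
    else if 100 ≤ n ∧ n ≤ 199 then "Upper Division"
    else if 200 ≤ n ∧ n ≤ 299 then "Graduate"
    else "Other"

-- ===== PORT B =====
def determine_level_alt (course_num : String) : String :=
  let digits : List Char := course_num.toList.filter PySem.Chars.isdigit   -- ''.join(generator)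
  if digits.isEmpty then ""   -- raise ValueError; excluded by Pre_determine_level
  else
    let sig : List Char := digits.dropWhile (· == '0')   -- .lstrip('0')
    if sig.isEmpty || decide (3 < sig.length) then "Other"
    else if decide (sig.length < 3) then "Lower Division"
    else (PySem.Dict.ofList [('1', "Upper Division"), ('2', "Graduate")]).getD
          ((PySem.List.pyGet? sig 0).getD ' ') "Other"

-- ===== PRECONDITION & SPEC =====
-- Pre_ excludes strings with no digit character: there int('') raises ValueError in A.
def Pre_determine_level (course_num : String) : Prop :=
  course_num.toList.any PySem.Chars.isdigit = true
instance (course_num : String) : Decidable (Pre_determine_level course_num) := by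
  unfold Pre_determine_level; infer_instance
def pvWitness_determine_level : String := "CS 161"

def Spec_determine_level (course_num : String) (out : String) : Prop := out = determine_level_alt course_num
instance (course_num : String) (out : String) : Decidable (Spec_determine_level course_num out) := by unfold Spec_determine_level; infer_instance

-- ===== CLAIM (what is proved, stated in full; the proofs are below) =====
def Claim_equal_determine_level : Prop := ∀ (course_num : String), Dom_determine_level course_num → Pre_determine_level course_num → Spec_determine_level course_num (determine_level course_num)

-- ===== LEMMAS AND PROOFS =====

theorem char_eq_of_toNat {c d : Char} (h : c.toNat = d.toNat) : c = d := by
  apply Char.ext; exact UInt32.toNat_inj.mp h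

-- the decimal value of a digit list
def digval (cs : List Char) : Nat := cs.foldl (fun a c => a * 10 + (c.toNat - 48)) 0

theorem digval_foldl_acc (l : List Char) (acc : Nat) :
    l.foldl (fun a c => a * 10 + (c.toNat - 48)) acc = acc * 10 ^ l.length + digval l := by
  induction l generalizing acc with
  | nil => simp [digval]
  | cons c t ih =>
    simp only [List.foldl_cons, List.length_cons, digval]
    rw [ih, ih (0 * 10 + (c.toNat - 48))]
    ring

theorem digit_bounds {c : Char} (h : PySem.Chars.isdigit c = true) :
    48 ≤ c.toNat ∧ c.toNat ≤ 57 := by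
  simp [PySem.Chars.isdigit, Char.le_def] at h
  exact h

theorem digval_head_expand {c : Char} (t : List Char) :
    digval (c :: t) = (c.toNat - 48) * 10 ^ t.length + digval t := by
  simp only [digval, List.foldl_cons]
  rw [digval_foldl_acc]
  norm_num
  rfl

theorem digval_lt {l : List Char} (h : ∀ c ∈ l, PySem.Chars.isdigit c = true) :
    digval l < 10 ^ l.length := by
  induction l with
  | nil => simp [digval]
  | cons c t ih =>
    have hc := digit_bounds (h c (by simp))
    have ht := ih (fun x hx => h x (List.mem_cons_of_mem _ hx))
    have hexp := digval_head_expand (c := c) t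
    have hd9 : c.toNat - 48 ≤ 9 := by omega
    calc digval (c :: t) = (c.toNat - 48) * 10 ^ t.length + digval t := hexp
      _ < (c.toNat - 48) * 10 ^ t.length + 10 ^ t.length := by omega
      _ = (c.toNat - 48 + 1) * 10 ^ t.length := by ring
      _ ≤ 10 * 10 ^ t.length := Nat.mul_le_mul_right _ (by omega)
      _ = 10 ^ (c :: t).length := by rw [List.length_cons]; ring

theorem digval_ge {c : Char} {t : List Char} (hd : PySem.Chars.isdigit c = true)
    (h0 : c ≠ '0') : 10 ^ t.length ≤ digval (c :: t) := by
  have hb := digit_bounds hd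
  have h49 : 49 ≤ c.toNat := by
    rcases Nat.lt_or_ge c.toNat 49 with h | h
    · exact absurd (char_eq_of_toNat (by rw [show '0'.toNat = 48 from rfl]; omega)) h0
    · exact h
  have hexp := digval_head_expand (c := c) t
  have : 1 * 10 ^ t.length ≤ (c.toNat - 48) * 10 ^ t.length :=
    Nat.mul_le_mul_right _ (by omega)
  omega

theorem digval_dropWhile_zero (l : List Char) :
    digval (l.dropWhile (· == '0')) = digval l := by
  induction l with
  | nil => rfl
  | cons c t ih =>
    rw [List.dropWhile_cons]
    by_cases hc : c = '0'
    · subst hc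
      simpa [digval] using ih
    · simp [hc]

-- ===== VERDICT (by name: the statement is the Claim_ definitions above) =====
theorem determine_level_spec : Claim_equal_determine_level := by
  intro s _ hpre
  unfold Spec_determine_level determine_level determine_level_alt
  rw [show (fun (acc : List Char) ch => if PySem.Chars.isdigit ch then acc ++ [ch] else acc)
        = (fun acc x => if PySem.Chars.isdigit x then acc ++ [id x] else acc) by rfl]
  rw [PySem.List.foldl_append_if PySem.Chars.isdigit id s.toList []]
  simp only [List.map_id, List.nil_append]
  set ds := s.toList.filter PySem.Chars.isdigit with hds
  have hdsne : ds ≠ [] := by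
    unfold Pre_determine_level at hpre
    rw [List.any_eq_true] at hpre
    obtain ⟨c, hc, hdig⟩ := hpre
    intro hnil
    have : c ∈ ds := by rw [hds, List.mem_filter]; exact ⟨hc, hdig⟩
    simp [hnil] at this
  have hdsdig : ∀ c ∈ ds, PySem.Chars.isdigit c = true := by
    intro c hc; exact (List.mem_filter.mp (hds ▸ hc)).2
  rw [show pyIntOfDigits? ds = some ((digval ds : Nat) : Int) by
        simp [pyIntOfDigits?, List.isEmpty_eq_false_iff.mpr hdsne, digval]]
  rw [List.isEmpty_eq_false_iff.mpr hdsne]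
  dsimp only
  simp only [Bool.false_eq_true, if_false]
  cases hsig : ds.dropWhile (· == '0') with
  | nil =>
    have hv0 : digval ds = 0 := by rw [← digval_dropWhile_zero ds, hsig]; rfl
    simp [hv0]
  | cons c t =>
    have hsigdig : ∀ x ∈ c :: t, PySem.Chars.isdigit x = true := by
      intro x hx
      refine hdsdig x ((List.dropWhile_sublist (p := (· == '0')) (l := ds)).subset ?_)
      rw [hsig]; exact hx
    have hc0 : c ≠ '0' := by
      have h := List.head_dropWhile_not (p := (· == '0')) (l := ds)
      rw [hsig] at h
      simpa using h (by simp)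
    have hcd : PySem.Chars.isdigit c = true := hsigdig c (by simp)
    have hcb := digit_bounds hcd
    have h49 : 49 ≤ c.toNat := by
      rcases Nat.lt_or_ge c.toNat 49 with h | h
      · exact absurd (char_eq_of_toNat (by rw [show '0'.toNat = 48 from rfl]; omega)) hc0
      · exact h
    have hval : digval (c :: t) = digval ds := by
      rw [← hsig]; exact digval_dropWhile_zero ds
    have hlow : 10 ^ t.length ≤ digval ds := hval ▸ digval_ge hcd hc0
    have hhigh : digval ds < 10 ^ (t.length + 1) := by
      have := digval_lt hsigdig
      simpa [hval] using this
    rcases t with _ | ⟨d, _ | ⟨e, _ | ⟨f, t'⟩⟩⟩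
    · -- one significant digit: 1 ≤ v ≤ 9
      simp only [List.length_nil, pow_zero] at hlow hhigh
      rw [if_pos (show (1:Int) ≤ (digval ds:Int) ∧ (digval ds:Int) ≤ 99 by
            constructor <;> omega)]
      rfl
    · -- two significant digits: 10 ≤ v ≤ 99
      norm_num at hlow hhigh
      rw [if_pos (show (1:Int) ≤ (digval ds:Int) ∧ (digval ds:Int) ≤ 99 by
            constructor <;> omega)]
      rfl
    · -- three significant digits: v = dc*100 + r, r < 100
      have hexp : digval ds = (c.toNat - 48) * 100 + digval [d, e] := by
        rw [← hval]
        simpa using digval_head_expand (c := c) [d, e]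
      have hr : digval [d, e] < 100 := by
        simpa using digval_lt (l := [d, e])
          (fun x hx => hsigdig x (List.mem_cons_of_mem _ hx))
      by_cases hc1 : c = '1'
      · subst hc1
        rw [show '1'.toNat = 49 from rfl] at hexp
        rw [if_neg (show ¬ ((1:Int) ≤ (digval ds:Int) ∧ (digval ds:Int) ≤ 99) by omega),
            if_pos (show (100:Int) ≤ (digval ds:Int) ∧ (digval ds:Int) ≤ 199 by
              constructor <;> omega)]
        rfl
      · by_cases hc2 : c = '2'
        · subst hc2
          rw [show '2'.toNat = 50 from rfl] at hexp
          rw [if_neg (show ¬ ((1:Int) ≤ (digval ds:Int) ∧ (digval ds:Int) ≤ 99) by omega),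
              if_neg (show ¬ ((100:Int) ≤ (digval ds:Int) ∧ (digval ds:Int) ≤ 199) by omega),
              if_pos (show (200:Int) ≤ (digval ds:Int) ∧ (digval ds:Int) ≤ 299 by
                constructor <;> omega)]
          rfl
        · -- leading digit ≥ 3: v ≥ 300, both sides "Other"
          have h51 : 51 ≤ c.toNat := by
            rcases Nat.lt_or_ge c.toNat 51 with h | h
            · rcases Nat.lt_or_ge c.toNat 50 with h2 | h2
              · exact absurd (char_eq_of_toNat (by rw [show '1'.toNat = 49 from rfl]; omega)) hc1
              · exact absurd (char_eq_of_toNat (by rw [show '2'.toNat = 50 from rfl]; omega)) hc2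
            · exact h
          rw [if_neg (show ¬ ((1:Int) ≤ (digval ds:Int) ∧ (digval ds:Int) ≤ 99) by omega),
              if_neg (show ¬ ((100:Int) ≤ (digval ds:Int) ∧ (digval ds:Int) ≤ 199) by omega),
              if_neg (show ¬ ((200:Int) ≤ (digval ds:Int) ∧ (digval ds:Int) ≤ 299) by omega)]
          have hb1 : ('1' == c) = false := by
            simp only [beq_eq_false_iff_ne]; exact fun h => hc1 h.symm
          have hb2 : ('2' == c) = false := by
            simp only [beq_eq_false_iff_ne]; exact fun h => hc2 h.symm
          have hofl : PySem.Dict.ofList [('1', "Upper Division"), ('2', "Graduate")]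
              = PySem.Dict.mk [('1', "Upper Division"), ('2', "Graduate")] := by rfl
          simp [hofl, PySem.Dict.getD_eq_get?_getD, PySem.Dict.get?, hb1, hb2]
    · -- four or more significant digits: v ≥ 1000
      have h1000 : 1000 ≤ digval ds := by
        have hp : 10 ^ 3 ≤ 10 ^ (d :: e :: f :: t').length :=
          Nat.pow_le_pow_right (by omega) (by simp)
        simp only [List.length_cons] at hlow hp ⊢
        omega
      rw [if_neg (show ¬ ((1:Int) ≤ (digval ds:Int) ∧ (digval ds:Int) ≤ 99) by omega),
          if_neg (show ¬ ((100:Int) ≤ (digval ds:Int) ∧ (digval ds:Int) ≤ 199) by omega),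
          if_neg (show ¬ ((200:Int) ≤ (digval ds:Int) ∧ (digval ds:Int) ≤ 299) by omega)]
      have hB : ((c :: d :: e :: f :: t').isEmpty
          || decide (3 < (c :: d :: e :: f :: t').length)) = true := by
        simp [List.length_cons]
      rw [if_pos hB]
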